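-- pv_equiv track=rewrite | github.com/piyush-gambhir/sawayam-nptel-courses-solutions | Getting Started with Competitive Programming/Week 3/week_3_programming_assignment_q2.py | optsch
-- ===== SOURCE A (Python) =====
-- def isgreater(a1, a2, ptr1, ptr2):
--     while ptr1 < len(a1) and ptr2 < len(a2) and a1[ptr1] == a2[ptr2]:
--         ptr1 += 1
--         ptr2 += 1
--
--     if ptr2 == len(a2):
--         return True
--     if ptr1 < len(a1) and a1[ptr1] > a2[ptr2]:
--         return True
--     return False
--
-- def numb(v, num):
--     st = []
--     ans = []
--     for i in range(len(v)):
--         while st and st[-1] < v[i] and len(st) + (len(v)-i-1) >= num: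
--             st.pop()
--
--         if len(st) < num:
--             st.append(v[i])
--
--     while st:
--         ans.append(st[-1])
--         st.pop()
--     ans.reverse()
--     return ans
--
-- def mergesort(a1, a2):
--     merge = []
--     ptr1 = 0
--     ptr2 = 0
--
--     while ptr1 < len(a1) or ptr2 < len(a2):
--         if isgreater(a1, a2, ptr1, ptr2):
--             merge.append(a1[ptr1])
--             ptr1 += 1
--         else:
--             merge.append(a2[ptr2])
--             ptr2 += 1
--
--     return merge
--
-- def optsch(m, g, d, mav, goo):
--     res = []
--     for i in range(min(m, d) + 1):
--         if i <= m and (d-i) <= g: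
--             v1 = numb(mav, i)
--             v2 = numb(goo, d-i)
--             res2 = mergesort(v1, v2)
--             if isgreater(res2, res, 0, 0):
--                 res = res2
--     return res
-- ===== SOURCE B (Python) =====
-- def best(v, num):
--     # lexicographically largest subsequence keeping up to num elements (greedy stack)
--     st = []
--     rest = len(v)
--     for x in v:
--         rest -= 1
--         while st and st[-1] < x and len(st) + rest >= num:
--             st.pop()
--         if len(st) < num:
--             st.append(x)
--     return st
--
-- def merge(a, b):
--     # greedy merge: always take from the side whose remaining suffix compares >=
--     out = []
--     while a or b:
--         if not (a < b):
--             out.append(a[0])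
--             a = a[1:]
--         else:
--             out.append(b[0])
--             b = b[1:]
--     return out
--
-- def optsch(m, g, d, mav, goo):
--     res = []
--     for i in range(min(m, d) + 1):
--         if d - i <= g:
--             cand = merge(best(mav, i), best(goo, d - i))
--             if not (cand < res):
--                 res = cand
--     return res
-- ===== Notes on version B (the rewrite author's own statement) =====
-- stated objective: idiomatic
-- what changed: B drops the hand-rolled pointer-rescanning suffix comparator (isgreater) entirely: the merge and the best-candidate test use the language's native lexicographic list comparison, the subsequence stack is built by a single structural pass carrying a remaining-count, and numb's pop-out-and-reverse epilogue is gone.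
import Mathlib
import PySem

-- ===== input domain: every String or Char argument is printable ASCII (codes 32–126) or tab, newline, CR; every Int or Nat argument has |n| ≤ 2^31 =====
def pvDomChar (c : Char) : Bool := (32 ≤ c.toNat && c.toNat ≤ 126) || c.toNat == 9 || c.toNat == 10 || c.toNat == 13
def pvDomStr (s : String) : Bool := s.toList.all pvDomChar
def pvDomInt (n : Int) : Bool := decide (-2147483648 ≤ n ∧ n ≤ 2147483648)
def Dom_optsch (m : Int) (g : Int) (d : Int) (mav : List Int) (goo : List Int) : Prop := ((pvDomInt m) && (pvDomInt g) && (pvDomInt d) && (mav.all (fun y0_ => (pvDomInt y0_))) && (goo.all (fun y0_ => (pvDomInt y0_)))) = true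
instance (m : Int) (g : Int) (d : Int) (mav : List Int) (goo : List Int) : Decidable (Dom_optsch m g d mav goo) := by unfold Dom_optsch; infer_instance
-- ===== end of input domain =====

-- B replaces A's hand-rolled suffix comparator (`isgreater`, rescanned at every merge step and at
-- every candidate comparison) by Python's native lexicographic list comparison; objective: idiomatic.

-- ===== PORT A =====
-- A's `isgreater`: while-loop skipping the common prefix, recursion on the remaining part of a1.
def isgreaterA (a1 a2 : List Int) (p1 p2 : Nat) : Bool :=
  if h : p1 < a1.length ∧ p2 < a2.length ∧ a1.getD p1 0 = a2.getD p2 0 then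
    isgreaterA a1 a2 (p1 + 1) (p2 + 1)
  else if p2 = a2.length then true
  else if p1 < a1.length ∧ a1.getD p1 0 > a2.getD p2 0 then true
  else false
termination_by a1.length - p1
decreasing_by omega

-- the inner `while st and st[-1] < v[i] and len(st)+(len(v)-i-1) >= num: st.pop()` of A's numb
-- (st[-1] read with getLastD 0: exact, the access is guarded by st ≠ [])
def popA (x rem num : Int) (st : List Int) : List Int :=
  if h : st ≠ [] ∧ st.getLastD 0 < x ∧ (st.length : Int) + rem ≥ num then
    popA x rem num st.dropLast
  else st
termination_by st.length
decreasing_by simp only [List.length_dropLast]; cases st <;> simp_all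

-- the final `while st: ans.append(st[-1]); st.pop()` of A's numb
def ansA (st ans : List Int) : List Int :=
  if h : st ≠ [] then ansA st.dropLast (ans ++ [st.getLastD 0]) else ans
termination_by st.length
decreasing_by simp only [List.length_dropLast]; cases st <;> simp_all

def numbStep (v : List Int) (num : Int) (st : List Int) (i : Nat) : List Int :=
  let st1 := popA (v.getD i 0) ((v.length : Int) - i - 1) num st
  if (st1.length : Int) < num then st1 ++ [v.getD i 0] else st1

def numbA (v : List Int) (num : Int) : List Int :=
  (ansA ((List.range v.length).foldl (numbStep v num) []) []).reverse

-- A's mergesort loop; fuel = a1.length + a2.length makes the recursion total (the Python loop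
-- runs exactly that many iterations from pointers 0,0), everything else is step for step.
def mergeGoA (a1 a2 : List Int) : Nat → Nat → Nat → List Int → List Int
  | 0, _, _, mg => mg
  | fuel + 1, p1, p2, mg =>
    if p1 < a1.length ∨ p2 < a2.length then
      if isgreaterA a1 a2 p1 p2 then mergeGoA a1 a2 fuel (p1 + 1) p2 (mg ++ [a1.getD p1 0])
      else mergeGoA a1 a2 fuel p1 (p2 + 1) (mg ++ [a2.getD p2 0])
    else mg

def mergesortA (a1 a2 : List Int) : List Int :=
  mergeGoA a1 a2 (a1.length + a2.length) 0 0 []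

def optsch (m : Int) (g : Int) (d : Int) (mav : List Int) (goo : List Int) : List Int :=
  (PySem.List.pyRange 0 (min m d + 1) 1).foldl
    (fun res i =>
      if i ≤ m ∧ d - i ≤ g then
        if isgreaterA (mergesortA (numbA mav i) (numbA goo (d - i))) res 0 0 then
          mergesortA (numbA mav i) (numbA goo (d - i))
        else res
      else res) []

-- ===== PORT B =====
-- B's inner `while st and st[-1] < x and len(st) + rest >= num: st.pop()`
def popB (x rest num : Int) (st : List Int) : List Int :=
  if h : st ≠ [] ∧ st.getLastD 0 < x ∧ (st.length : Int) + rest ≥ num then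
    popB x rest num st.dropLast
  else st
termination_by st.length
decreasing_by simp only [List.length_dropLast]; cases st <;> simp_all

-- B's best: structural recursion over v carrying the stack and the count of remaining elements
def bestGo (num : Int) : List Int → List Int → Int → List Int
  | st, [], _ => st
  | st, x :: xs, rest =>
    let r := rest - 1
    let st1 := popB x r num st
    bestGo num (if (st1.length : Int) < num then st1 ++ [x] else st1) xs r

def bestB (v : List Int) (num : Int) : List Int := bestGo num [] v (v.length : Int)

-- B's merge: take from the side whose whole remaining list compares ≥ (Python's native list
-- order = Lean's List `<`); a[0]/a[1:] read with headD/tail, exact since the access is guarded.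
def mergeB (a b : List Int) : List Int :=
  if h : a ≠ [] ∨ b ≠ [] then
    if h2 : ¬ (a < b) then a.headD 0 :: mergeB a.tail b
    else b.headD 0 :: mergeB a b.tail
  else []
termination_by a.length + b.length
decreasing_by
  · have ha : a ≠ [] := by
      rintro rfl
      rcases h with h | h
      · exact h rfl
      · cases b with
        | nil => exact h rfl
        | cons y ys => exact h2 (List.nil_lt_cons y ys)
    cases a <;> simp_all
  · have hb : b ≠ [] := by
      rintro rfl
      exact List.not_lt_nil a (not_not.mp h2)
    cases b <;> simp_all

def optsch_alt (m : Int) (g : Int) (d : Int) (mav : List Int) (goo : List Int) : List Int :=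
  (PySem.List.pyRange 0 (min m d + 1) 1).foldl
    (fun res i =>
      if d - i ≤ g then
        if ¬ (mergeB (bestB mav i) (bestB goo (d - i)) < res) then
          mergeB (bestB mav i) (bestB goo (d - i))
        else res
      else res) []

-- ===== PRECONDITION & SPEC =====
def Spec_optsch (m : Int) (g : Int) (d : Int) (mav : List Int) (goo : List Int) (out : List Int) : Prop := out = optsch_alt m g d mav goo
instance (m : Int) (g : Int) (d : Int) (mav : List Int) (goo : List Int) (out : List Int) : Decidable (Spec_optsch m g d mav goo out) := by unfold Spec_optsch; infer_instance

-- ===== CLAIM (what is proved, stated in full; the proofs are below) =====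
def Claim_equal_optsch : Prop := ∀ (m : Int) (g : Int) (d : Int) (mav : List Int) (goo : List Int), Dom_optsch m g d mav goo → Spec_optsch m g d mav goo (optsch m g d mav goo)

-- ===== LEMMAS AND PROOFS =====

lemma pop_eq (x rem num : Int) (st : List Int) : popA x rem num st = popB x rem num st := by
  fun_induction popA x rem num st with
  | case1 st h ih => rw [popB, dif_pos h]; exact ih
  | case2 st h => rw [popB, dif_neg h]

lemma isgreaterA_eq (a1 a2 : List Int) (p1 p2 : Nat) (hp2 : p2 ≤ a2.length) :
    isgreaterA a1 a2 p1 p2 = !decide (a1.drop p1 < a2.drop p2) := by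
  fun_induction isgreaterA a1 a2 p1 p2 with
  | case1 p1 p2 h ih =>
    obtain ⟨h1, h2, h3⟩ := h
    rw [ih (by omega)]
    rw [List.drop_eq_getElem_cons h1, List.drop_eq_getElem_cons h2]
    rw [List.getD_eq_getElem _ _ h1, List.getD_eq_getElem _ _ h2] at h3
    simp only [List.cons_lt_cons_iff, h3]
    simp
  | case2 =>
    -- p2 = a2.length: drop p2 a2 = [], nothing is < []
    rename_i p1 h
    have : a2.drop a2.length = [] := by rw [List.drop_eq_nil_iff]
    simp [this, List.not_lt_nil]
  | case3 =>
    -- p1 in range and a1[p1] > a2[p2]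
    rename_i p1 p2 h h2 h3
    have hp2' : p2 < a2.length := by omega
    obtain ⟨h1, hgt⟩ := h3
    rw [List.getD_eq_getElem _ _ h1, List.getD_eq_getElem _ _ hp2'] at hgt
    have hnlt : ¬ (a1.drop p1 < a2.drop p2) := by
      rw [List.drop_eq_getElem_cons h1, List.drop_eq_getElem_cons hp2', List.cons_lt_cons_iff]
      rintro (hlt | ⟨he, _⟩) <;> omega
    simp [hnlt]
  | case4 =>
    rename_i p1 p2 h h2 h3
    have hp2' : p2 < a2.length := by omega
    by_cases h1 : p1 < a1.length
    · rw [List.getD_eq_getElem _ _ h1, List.getD_eq_getElem _ _ hp2'] at h h3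
      have hne : ¬ (a1[p1] = a2[p2]) := fun he => h ⟨h1, hp2', he⟩
      have hlt : a1[p1] < a2[p2] := by
        rcases lt_trichotomy (a1[p1]) (a2[p2]) with hc | hc | hc
        · exact hc
        · exact absurd hc hne
        · exact absurd ⟨h1, hc⟩ h3
      have hltp : a1.drop p1 < a2.drop p2 := by
        rw [List.drop_eq_getElem_cons h1, List.drop_eq_getElem_cons hp2', List.cons_lt_cons_iff]
        exact Or.inl hlt
      simp [hltp]
    · have hnil : a1.drop p1 = [] := by rw [List.drop_eq_nil_iff]; omega
      have hltp : a1.drop p1 < a2.drop p2 := by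
        rw [hnil, List.drop_eq_getElem_cons hp2']
        exact List.nil_lt_cons _ _
      simp [hltp]

lemma mergeGo_eq (a1 a2 : List Int) :
    ∀ (fuel p1 p2 : Nat) (acc : List Int), p1 ≤ a1.length → p2 ≤ a2.length →
      (a1.length - p1) + (a2.length - p2) = fuel →
      mergeGoA a1 a2 fuel p1 p2 acc = acc ++ mergeB (a1.drop p1) (a2.drop p2) := by
  intro fuel
  induction fuel with
  | zero =>
    intro p1 p2 acc h1 h2 hf
    have e1 : a1.drop p1 = [] := by rw [List.drop_eq_nil_iff]; omega
    have e2 : a2.drop p2 = [] := by rw [List.drop_eq_nil_iff]; omega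
    rw [e1, e2, mergeGoA, mergeB]
    simp
  | succ fuel ih =>
    intro p1 p2 acc h1 h2 hf
    have hcond : p1 < a1.length ∨ p2 < a2.length := by omega
    rw [mergeGoA, if_pos hcond, isgreaterA_eq a1 a2 p1 p2 h2]
    have hne : a1.drop p1 ≠ [] ∨ a2.drop p2 ≠ [] := by
      rcases hcond with h | h
      · left; rw [Ne, List.drop_eq_nil_iff]; omega
      · right; rw [Ne, List.drop_eq_nil_iff]; omega
    by_cases hlt : a1.drop p1 < a2.drop p2
    · -- isgreater false: take from a2; then p2 < a2.length
      have hp2 : p2 < a2.length := by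
        by_contra hc
        have : a2.drop p2 = [] := by rw [List.drop_eq_nil_iff]; omega
        rw [this] at hlt
        exact List.not_lt_nil _ hlt
      simp only [hlt, decide_true, Bool.not_true, Bool.false_eq_true, if_false]
      rw [ih (p1) (p2 + 1) _ h1 (by omega) (by omega)]
      conv_rhs => rw [mergeB]
      rw [dif_pos hne, dif_neg (not_not.mpr hlt)]
      rw [List.getD_eq_getElem _ _ hp2]
      rw [show a2.drop p2 = a2[p2] :: a2.drop (p2 + 1) from List.drop_eq_getElem_cons hp2]
      simp [List.getElem?_eq_getElem hp2]
    · have hp1 : p1 < a1.length := by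
        by_contra hc
        have e1 : a1.drop p1 = [] := by rw [List.drop_eq_nil_iff]; omega
        rcases hne with h | h
        · exact h e1
        · rw [e1] at hlt
          rcases List.exists_cons_of_ne_nil h with ⟨y, ys, hy⟩
          rw [hy] at hlt
          exact hlt (List.nil_lt_cons y ys)
      simp only [hlt, decide_false, Bool.not_false, if_true]
      rw [ih (p1 + 1) p2 _ (by omega) h2 (by omega)]
      conv_rhs => rw [mergeB]
      rw [dif_pos hne, dif_pos hlt]
      rw [List.getD_eq_getElem _ _ hp1]
      rw [show a1.drop p1 = a1[p1] :: a1.drop (p1 + 1) from List.drop_eq_getElem_cons hp1]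
      simp [List.getElem?_eq_getElem hp1]

lemma ansA_eq (st : List Int) : ∀ ans, ansA st ans = ans ++ st.reverse := by
  induction st using List.reverseRecOn with
  | nil => intro ans; rw [ansA]; simp
  | append_singleton ys y ih =>
    intro ans
    rw [ansA, dif_pos (by simp)]
    rw [List.dropLast_concat, List.getLastD_concat, ih]
    simp

lemma bestGo_eq (v : List Int) (num : Int) :
    ∀ (k : Nat) (st : List Int), k ≤ v.length →
      (List.range' k (v.length - k)).foldl (numbStep v num) st
      = bestGo num st (v.drop k) ((v.length : Int) - k) := by
    intro k
    induction hn : v.length - k generalizing k with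
    | zero =>
      intro st hk
      have hd : v.drop k = [] := by rw [List.drop_eq_nil_iff]; omega
      rw [hd]
      simp [bestGo]
    | succ n ih =>
      intro st hk
      have hk' : k < v.length := by omega
      rw [List.range'_succ, List.drop_eq_getElem_cons hk']
      simp only [List.foldl_cons, bestGo]
      have hstep : numbStep v num st k
          = (if ((popB (v[k]) ((v.length : Int) - k - 1) num st).length : Int) < num
             then popB (v[k]) ((v.length : Int) - k - 1) num st ++ [v[k]]
             else popB (v[k]) ((v.length : Int) - k - 1) num st) := by
        unfold numbStep
        rw [pop_eq, List.getD_eq_getElem _ _ hk']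
      rw [hstep]
      have := ih (k + 1) (by omega) (if ((popB (v[k]) ((v.length : Int) - k - 1) num st).length : Int) < num
             then popB (v[k]) ((v.length : Int) - k - 1) num st ++ [v[k]]
             else popB (v[k]) ((v.length : Int) - k - 1) num st) (by omega)
      have harith : (v.length : Int) - (k + 1 : Nat) = (v.length : Int) - k - 1 := by push_cast; ring
      rw [harith] at this
      rw [this]

lemma numb_eq (v : List Int) (num : Int) : numbA v num = bestB v num := by
  unfold numbA bestB
  rw [ansA_eq, List.nil_append, List.reverse_reverse]
  rw [List.range_eq_range']
  have := bestGo_eq v num 0 [] (by omega)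
  simpa using this

lemma mergesortA_eq (a1 a2 : List Int) : mergesortA a1 a2 = mergeB a1 a2 := by
  unfold mergesortA
  rw [mergeGo_eq a1 a2 (a1.length + a2.length) 0 0 [] (by omega) (by omega) (by omega)]
  simp

-- ===== VERDICT (by name: the statement is the Claim_ definition above) =====
theorem optsch_spec : Claim_equal_optsch := by
  intro m g d mav goo _
  unfold Spec_optsch optsch optsch_alt
  apply PySem.List.foldl_congr_mem
  intro res i hi
  rw [PySem.List.mem_pyRange_one] at hi
  have him : i ≤ m := by omega
  simp only [him, true_and]
  by_cases hg : d - i ≤ g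
  · simp only [hg, if_true]
    rw [numb_eq, numb_eq, mergesortA_eq]
    rw [isgreaterA_eq _ _ 0 0 (by omega)]
    simp only [List.drop_zero]
    by_cases hc : mergeB (bestB mav i) (bestB goo (d - i)) < res <;> simp [hc]
  · simp [hg]
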